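-- pv_equiv track=rewrite | github.com/DmitriiNikolaevAtAmd/tprimat | evaluate/compare.py | generate_styles
-- ===== SOURCE A (Python) =====
-- from typing import Dict
--
-- PLATFORM_COLORS = {
--     'nvidia': ['#27AE60', '#229954', '#1E8449', '#52BE80', '#7DCEA0'],
--     'amd': ['#E74C3C', '#C0392B', '#922B21', '#EC7063', '#F1948A'],
--     'unknown': ['#9B59B6', '#8E44AD', '#7D3C98', '#AF7AC5', '#D2B4DE'],
-- }
--
-- FRAMEWORK_DISPLAY = {
--     'nemo': 'NeMo',
--     'mega': 'Megatron',
--     'prim': 'Primus',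
--     'deep': 'DeepSpeed',
--     'fsdp': 'FSDP',
--     'tran': 'Transformers',
-- }
--
-- MARKERS = ['o', 's', '^', 'D', 'v', 'p', 'h', '*']
--
-- LINESTYLES = ['-', '--', '-.', ':']
--
-- def generate_styles(benchmarks: Dict[str, Dict]) -> Dict[str, Dict]:
--     """Generate unique styles for each benchmark."""
--     styles = {}
--
--     # Group by platform to assign colors
--     platform_counts = {}
--     for key, data in benchmarks.items():
--         platform = data.get('_platform', 'unknown')
--         platform_counts.setdefault(platform, []).append(key)
--
--     for platform, keys in platform_counts.items():
--         colors = PLATFORM_COLORS.get(platform, PLATFORM_COLORS['unknown'])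
--
--         for i, key in enumerate(sorted(keys)):
--             data = benchmarks[key]
--             framework = data.get('_framework', 'unknown')
--             model = data.get('_model', 'unknown')
--             fw_display = FRAMEWORK_DISPLAY.get(framework, framework.upper())
--             platform_display = platform.upper()
--
--             label = f"{platform_display} {fw_display} {model.capitalize()}"
--
--             styles[key] = {
--                 'color': colors[i % len(colors)],
--                 'marker': MARKERS[i % len(MARKERS)],
--                 'linestyle': LINESTYLES[i % len(LINESTYLES)],
--                 'label': label,
--             }
--
--     return styles
-- ===== SOURCE B (Python) =====
-- from typing import Dict
--
-- PLATFORM_COLORS = {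
--     'nvidia': ['#27AE60', '#229954', '#1E8449', '#52BE80', '#7DCEA0'],
--     'amd': ['#E74C3C', '#C0392B', '#922B21', '#EC7063', '#F1948A'],
--     'unknown': ['#9B59B6', '#8E44AD', '#7D3C98', '#AF7AC5', '#D2B4DE'],
-- }
--
-- FRAMEWORK_DISPLAY = {
--     'nemo': 'NeMo',
--     'mega': 'Megatron',
--     'prim': 'Primus',
--     'deep': 'DeepSpeed',
--     'fsdp': 'FSDP',
--     'tran': 'Transformers',
-- }
--
-- MARKERS = ['o', 's', '^', 'D', 'v', 'p', 'h', '*']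
--
-- LINESTYLES = ['-', '--', '-.', ':']
--
--
-- def _cycled(lst, n):
--     """First n elements of lst repeated cyclically."""
--     return (lst * (n // len(lst) + 1))[:n]
--
--
-- def generate_styles(benchmarks: Dict[str, Dict]) -> Dict[str, Dict]:
--     """Generate unique styles for each benchmark (global sort + pre-cycled style streams)."""
--     platforms = list(dict.fromkeys(d.get('_platform', 'unknown') for d in benchmarks.values()))
--     keys_sorted = sorted(benchmarks)
--     styles = {}
--     for platform in platforms:
--         colors = PLATFORM_COLORS.get(platform, PLATFORM_COLORS['unknown'])
--         group = [k for k in keys_sorted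
--                  if benchmarks[k].get('_platform', 'unknown') == platform]
--         n = len(group)
--         for key, color, marker, ls in zip(group, _cycled(colors, n),
--                                           _cycled(MARKERS, n), _cycled(LINESTYLES, n)):
--             data = benchmarks[key]
--             framework = data.get('_framework', 'unknown')
--             model = data.get('_model', 'unknown')
--             fw_display = FRAMEWORK_DISPLAY.get(framework, framework.upper())
--             styles[key] = {
--                 'color': color,
--                 'marker': marker,
--                 'linestyle': ls,
--                 'label': ' '.join([platform.upper(), fw_display, model.capitalize()]),
--             }
--     return styles
-- ===== Notes on version B (the rewrite author's own statement) =====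
-- stated objective: alternative
-- what changed: A buckets keys into per-platform lists via a setdefault dict, sorts each bucket, and picks each style by enumerate index with modulo arithmetic; B sorts all keys once globally, selects each first-seen platform's group from that sorted list, and assigns styles by zipping the group against pre-cycled color/marker/linestyle streams, with no bucketing dict, no per-group sort and no index/modulo arithmetic.
import Mathlib
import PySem

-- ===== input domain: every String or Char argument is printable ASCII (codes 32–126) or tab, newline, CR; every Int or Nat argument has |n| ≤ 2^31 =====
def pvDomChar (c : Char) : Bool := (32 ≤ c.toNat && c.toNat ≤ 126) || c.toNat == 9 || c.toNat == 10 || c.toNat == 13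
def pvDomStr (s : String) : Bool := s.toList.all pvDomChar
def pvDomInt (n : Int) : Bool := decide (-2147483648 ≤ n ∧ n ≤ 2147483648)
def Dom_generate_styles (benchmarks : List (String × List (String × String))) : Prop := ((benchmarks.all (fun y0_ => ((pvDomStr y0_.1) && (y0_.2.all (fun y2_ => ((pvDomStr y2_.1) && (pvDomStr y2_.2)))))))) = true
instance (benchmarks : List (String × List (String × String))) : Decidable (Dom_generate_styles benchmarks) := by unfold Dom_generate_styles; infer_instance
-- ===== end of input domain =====

-- B replaces A's setdefault-bucketing dict, per-group sorts and enumerate/modulo style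
-- indexing by one global sort plus per-platform selection zipped against pre-cycled style
-- streams (objective: alternative decomposition, same cost).

-- ===== PORT A =====
-- module constants (shared by both Pythons)
def pvPlatformColors : PySem.Dict String (List String) := PySem.Dict.ofList
  [("nvidia", ["#27AE60", "#229954", "#1E8449", "#52BE80", "#7DCEA0"]),
   ("amd", ["#E74C3C", "#C0392B", "#922B21", "#EC7063", "#F1948A"]),
   ("unknown", ["#9B59B6", "#8E44AD", "#7D3C98", "#AF7AC5", "#D2B4DE"])]

def pvFrameworkDisplay : PySem.Dict String String := PySem.Dict.ofList
  [("nemo", "NeMo"), ("mega", "Megatron"), ("prim", "Primus"),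
   ("deep", "DeepSpeed"), ("fsdp", "FSDP"), ("tran", "Transformers")]

def pvMarkers : List String := ["o", "s", "^", "D", "v", "p", "h", "*"]

def pvLinestyles : List String := ["-", "--", "-.", ":"]

-- str.capitalize (ASCII-exact): first char uppercased, the rest lowered; used by both Pythons
def pyCapitalize (s : String) : String :=
  match s.toList with
  | [] => ""
  | c :: cs => String.ofList (PySem.Chars.upperChar c :: PySem.Chars.lower cs)

-- A's per-key style row: styles[key] = {...} with i % len indexing
def pvStyleRow (platform : String) (colors : List String) (i : Int) (data : List (String × String)) :
    List (String × String) :=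
  let framework := (PySem.Dict.mk data).getD "_framework" "unknown"
  let model := (PySem.Dict.mk data).getD "_model" "unknown"
  let fw_display := pvFrameworkDisplay.getD framework (PySem.Str.upper framework)
  let platform_display := PySem.Str.upper platform
  let label := PySem.Str.join " " [platform_display, fw_display, pyCapitalize model]
  [("color", PySem.List.pyGetD colors (PySem.Int.mod i (colors.length : Int)) ""),
   ("marker", PySem.List.pyGetD pvMarkers (PySem.Int.mod i (pvMarkers.length : Int)) ""),
   ("linestyle", PySem.List.pyGetD pvLinestyles (PySem.Int.mod i (pvLinestyles.length : Int)) ""),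
   ("label", label)]

def generate_styles (benchmarks : List (String × List (String × String))) :
    List (String × List (String × String)) :=
  let b := PySem.Dict.mk benchmarks
  -- group by platform: platform_counts.setdefault(platform, []).append(key)
  let platform_counts : PySem.Dict String (List String) :=
    benchmarks.foldl (fun d kd =>
      let platform := (PySem.Dict.mk kd.2).getD "_platform" "unknown"
      d.modify platform [] (· ++ [kd.1])) PySem.Dict.empty
  let styles : PySem.Dict String (List (String × String)) :=
    platform_counts.items.foldl (fun styles pk =>
      let platform := pk.1
      let colors := pvPlatformColors.getD platform (pvPlatformColors.getD "unknown" [])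
      (PySem.List.enumerate (PySem.List.sorted pk.2 (fun k => k) false)).foldl (fun styles ik =>
        let data := b.getD ik.2 []
        styles.insert ik.2 (pvStyleRow platform colors ik.1 data)) styles) PySem.Dict.empty
  styles.items

-- ===== PORT B =====
-- _cycled(lst, n) = (lst * (n // len(lst) + 1))[:n]  (the slice [:n], 0 ≤ n, is List.take n)
def pvCycled (lst : List String) (n : Nat) : List String :=
  (PySem.List.pyRepeat lst (PySem.Int.floordiv (n : Int) (lst.length : Int) + 1)).take n

def generate_styles_alt (benchmarks : List (String × List (String × String))) :
    List (String × List (String × String)) :=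
  let b := PySem.Dict.mk benchmarks
  let platforms := PySem.List.dedup
    (benchmarks.map (fun kd => (PySem.Dict.mk kd.2).getD "_platform" "unknown"))
  let keys_sorted := PySem.List.sorted (benchmarks.map (fun kd => kd.1)) (fun k => k) false
  let styles : PySem.Dict String (List (String × String)) :=
    platforms.foldl (fun styles platform =>
      let colors := pvPlatformColors.getD platform (pvPlatformColors.getD "unknown" [])
      let group := keys_sorted.filter (fun k =>
        (PySem.Dict.mk (b.getD k [])).getD "_platform" "unknown" == platform)
      let n := group.length
      (group.zip ((pvCycled colors n).zip ((pvCycled pvMarkers n).zip (pvCycled pvLinestyles n)))).foldl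
        (fun styles kcml =>
          let data := b.getD kcml.1 []
          let framework := (PySem.Dict.mk data).getD "_framework" "unknown"
          let model := (PySem.Dict.mk data).getD "_model" "unknown"
          let fw_display := pvFrameworkDisplay.getD framework (PySem.Str.upper framework)
          styles.insert kcml.1
            [("color", kcml.2.1), ("marker", kcml.2.2.1), ("linestyle", kcml.2.2.2),
             ("label", PySem.Str.join " " [PySem.Str.upper platform, fw_display, pyCapitalize model])])
        styles) PySem.Dict.empty
  styles.items

-- ===== PRECONDITION & SPEC =====
-- Pre_ excludes association lists with duplicate keys (in the outer dict or in any inner data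
-- dict): a Python dict cannot carry duplicates, and first-match vs last-write resolution on
-- such lists is an accident of the encoding.
def Pre_generate_styles (benchmarks : List (String × List (String × String))) : Prop :=
  (benchmarks.map (fun kd => kd.1)).Nodup ∧
  ∀ kd ∈ benchmarks, (kd.2.map (fun p => p.1)).Nodup

instance (benchmarks : List (String × List (String × String))) : Decidable (Pre_generate_styles benchmarks) := by
  unfold Pre_generate_styles; infer_instance

def pvWitness_generate_styles : (List (String × List (String × String))) :=
  [("b", [("_platform", "amd"), ("_model", "llama")]),
   ("a", [("_platform", "amd"), ("_framework", "nemo")]),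
   ("c", [("_platform", "rocm")])]

def Spec_generate_styles (benchmarks : List (String × List (String × String))) (out : List (String × List (String × String))) : Prop := out = generate_styles_alt benchmarks
instance (benchmarks : List (String × List (String × String))) (out : List (String × List (String × String))) : Decidable (Spec_generate_styles benchmarks out) := by unfold Spec_generate_styles; infer_instance

-- ===== CLAIM (what is proved, stated in full; the proofs are below) =====
def Claim_equal_generate_styles : Prop := ∀ (benchmarks : List (String × List (String × String))), Dom_generate_styles benchmarks → Pre_generate_styles benchmarks → Spec_generate_styles benchmarks (generate_styles benchmarks)

-- ===== LEMMAS AND PROOFS =====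

-- the platform of a data dict
def pvPlat (d : List (String × String)) : String := (PySem.Dict.mk d).getD "_platform" "unknown"

-- A's bucket for platform p: the keys of the entries whose platform is p, in input order
def pvGrpA (l : List (String × List (String × String))) (p : String) : List String :=
  (l.filter (fun kd => pvPlat kd.2 == p)).map (fun kd => kd.1)

-- B's group for platform p: the globally sorted keys, filtered by a platform lookup
def pvGrpB (l : List (String × List (String × String))) (p : String) : List String :=
  (PySem.List.sorted (l.map (fun kd => kd.1)) (fun k => k) false).filter (fun k =>
    (PySem.Dict.mk ((PySem.Dict.mk l).getD k [])).getD "_platform" "unknown" == p)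

-- A's style-assignment loop for one platform group
def pvInner (b : PySem.Dict String (List (String × String))) (platform : String)
    (ks : List String) (styles : PySem.Dict String (List (String × String))) :
    PySem.Dict String (List (String × String)) :=
  let colors := pvPlatformColors.getD platform (pvPlatformColors.getD "unknown" [])
  (PySem.List.enumerate ks).foldl (fun styles ik =>
    let data := b.getD ik.2 []
    styles.insert ik.2 (pvStyleRow platform colors ik.1 data)) styles

-- A's grouping dict, as a map over the first-seen-ordered distinct platforms
lemma pc_spec (l : List (String × List (String × String))) :
    (l.foldl (fun d kd =>
        let platform := (PySem.Dict.mk kd.2).getD "_platform" "unknown"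
        d.modify platform [] (· ++ [kd.1])) PySem.Dict.empty).items
      = (PySem.Set.ofList (l.map (fun kd => pvPlat kd.2))).map (fun p => (p, pvGrpA l p)) := by
  have hmap : (l.foldl (fun d kd =>
        let platform := (PySem.Dict.mk kd.2).getD "_platform" "unknown"
        d.modify platform [] (· ++ [kd.1])) PySem.Dict.empty)
      = (l.map (fun kd => (pvPlat kd.2, kd.1))).foldl
          (fun d p => d.modify p.1 [] (· ++ [p.2])) PySem.Dict.empty := by
    rw [List.foldl_map]
    rfl
  rw [hmap]
  have hnd : ((l.map (fun kd => (pvPlat kd.2, kd.1))).foldl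
      (fun d p => d.modify p.1 [] (· ++ [p.2])) PySem.Dict.empty).keys.Nodup :=
    PySem.Dict.nodup_keys_foldl_modify_key _ _ _ _ _ PySem.Dict.nodup_keys_empty
  rw [PySem.Dict.items_eq_map_keys _ hnd []]
  have hkeys : ((l.map (fun kd => (pvPlat kd.2, kd.1))).foldl
      (fun d p => d.modify p.1 [] (· ++ [p.2])) PySem.Dict.empty).keys
      = PySem.Set.ofList (l.map (fun kd => pvPlat kd.2)) := by
    rw [PySem.Dict.keys_foldl_modify_key, List.map_map]
    rfl
  rw [hkeys]
  refine List.map_eq_map_iff.mpr ?_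
  intro p _
  rw [PySem.Dict.getD_foldl_modify_append]
  simp only [PySem.Dict.getD_empty, List.nil_append, List.filter_map, List.map_map]
  rfl

-- A, rewritten as one fold over the distinct platforms with per-platform sorted buckets
lemma A_shape (l : List (String × List (String × String))) :
    generate_styles l =
      ((PySem.Set.ofList (l.map (fun kd => pvPlat kd.2))).foldl (fun st p =>
        pvInner (PySem.Dict.mk l) p (PySem.List.sorted (pvGrpA l p) (fun k => k) false) st)
        PySem.Dict.empty).items := by
  simp only [generate_styles]
  rw [pc_spec, List.foldl_map]
  simp only [pvInner]

-- (lst * m).flatten indexes cyclically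
lemma flatRep_getD (lst : List String) (m i : Nat) (h : i < m * lst.length) :
    ((List.replicate m lst).flatten).getD i "" = lst.getD (i % lst.length) "" := by
  induction m generalizing i with
  | zero => omega
  | succ m ih =>
    have hm : (m+1) * lst.length = m * lst.length + lst.length := Nat.succ_mul m lst.length
    by_cases hi : i < lst.length
    · rw [List.replicate_succ, List.flatten_cons, List.getD_append _ _ _ _ hi, Nat.mod_eq_of_lt hi]
    · rw [List.replicate_succ, List.flatten_cons, List.getD_append_right _ _ _ _ (by omega)]
      rw [ih _ (by omega)]
      congr 1
      conv_rhs => rw [show i = (i - lst.length) + 1 * lst.length by omega]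
      rw [Nat.add_mul_mod_self_right]

-- n < (n/L + 1)*L for positive L
lemma pv_lt_cycle (n L : Nat) (hL : 0 < L) : n < (n / L + 1) * L := by
  have h1 : n / L * L + n % L = n := Nat.div_add_mod' n L
  have hm := Nat.mod_lt n hL
  rw [Nat.succ_mul]
  omega

lemma cycled_length (lst : List String) (n : Nat) (h : lst ≠ []) :
    (pvCycled lst n).length = n := by
  have hL : 0 < lst.length := List.length_pos_iff.mpr h
  simp only [pvCycled, PySem.List.pyRepeat, List.length_take, List.length_flatten,
    PySem.Int.floordiv_natCast]
  rw [show (((n / lst.length : Nat) : Int) + 1) = ((n / lst.length + 1 : Nat) : Int) by push_cast; ring,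
    Int.toNat_natCast, List.map_replicate, List.sum_replicate, smul_eq_mul]
  exact Nat.min_eq_left (pv_lt_cycle n lst.length hL).le

lemma cycled_getD (lst : List String) (n i : Nat) (h : lst ≠ []) (hi : i < n) :
    (pvCycled lst n).getD i "" = lst.getD (i % lst.length) "" := by
  have hL : 0 < lst.length := List.length_pos_iff.mpr h
  simp only [pvCycled, PySem.List.pyRepeat, PySem.Int.floordiv_natCast]
  rw [show (((n / lst.length : Nat) : Int) + 1) = ((n / lst.length + 1 : Nat) : Int) by push_cast; ring,
    Int.toNat_natCast, List.getD_eq_getElem?_getD, List.getElem?_take_of_lt hi,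
    ← List.getD_eq_getElem?_getD]
  exact flatRep_getD lst _ i (lt_of_lt_of_le hi (pv_lt_cycle n lst.length hL).le)

-- enumerate(xs, s): length and elements
lemma enum_length {α : Type} (xs : List α) (s : Int) :
    (PySem.List.enumerate xs s).length = xs.length := by
  induction xs generalizing s with
  | nil => rfl
  | cons x t ih => simp [PySem.List.enumerate, ih]

lemma enum_getElem {α : Type} (xs : List α) (s : Int) (i : Nat) (h : i < xs.length)
    (h' : i < (PySem.List.enumerate xs s).length) :
    (PySem.List.enumerate xs s)[i] = (s + i, xs[i]) := by
  induction xs generalizing s i with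
  | nil => simp at h
  | cons x t ih =>
    cases i with
    | zero => simp [PySem.List.enumerate]
    | succ j =>
      have hj : j < t.length := by simpa using h
      simp only [show PySem.List.enumerate (x :: t) s
          = (s, x) :: PySem.List.enumerate t (s+1) from rfl, List.getElem_cons_succ]
      rw [ih (s+1) j hj (by rw [enum_length]; exact hj)]
      congr 1
      push_cast
      ring

-- the zipped cyclic streams are exactly enumerate + modulo indexing
lemma zip_cycled_eq (ks : List String) (c : List String) (hc : c ≠ []) :
    ks.zip ((pvCycled c ks.length).zip ((pvCycled pvMarkers ks.length).zip
        (pvCycled pvLinestyles ks.length)))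
      = (PySem.List.enumerate ks).map (fun ik =>
          (ik.2, (PySem.List.pyGetD c (PySem.Int.mod ik.1 (c.length : Int)) "",
            (PySem.List.pyGetD pvMarkers (PySem.Int.mod ik.1 (pvMarkers.length : Int)) "",
             PySem.List.pyGetD pvLinestyles (PySem.Int.mod ik.1 (pvLinestyles.length : Int)) "")))) := by
  have hm : pvMarkers ≠ [] := by simp [pvMarkers]
  have hl : pvLinestyles ≠ [] := by simp [pvLinestyles]
  apply List.ext_getElem
  · simp [List.length_zip, cycled_length c _ hc, cycled_length pvMarkers _ hm,
      cycled_length pvLinestyles _ hl]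
  · intro i h1 h2
    have hik : i < ks.length := by
      simp [List.length_zip, cycled_length c _ hc, cycled_length pvMarkers _ hm,
        cycled_length pvLinestyles _ hl] at h1
      omega
    have he : i < (PySem.List.enumerate ks 0).length := by rw [enum_length]; exact hik
    rw [List.getElem_map, enum_getElem ks 0 i hik he]
    simp only [List.getElem_zip]
    have gc : i < (pvCycled c ks.length).length := by rw [cycled_length c _ hc]; exact hik
    have gm : i < (pvCycled pvMarkers ks.length).length := by
      rw [cycled_length pvMarkers _ hm]; exact hik
    have gl : i < (pvCycled pvLinestyles ks.length).length := by
      rw [cycled_length pvLinestyles _ hl]; exact hik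
    have pc : (pvCycled c ks.length)[i] = c.getD (i % c.length) "" := by
      rw [← List.getD_eq_getElem _ "" gc, cycled_getD c _ _ hc hik]
    have pm : (pvCycled pvMarkers ks.length)[i] = pvMarkers.getD (i % pvMarkers.length) "" := by
      rw [← List.getD_eq_getElem _ "" gm, cycled_getD pvMarkers _ _ hm hik]
    have pl : (pvCycled pvLinestyles ks.length)[i]
        = pvLinestyles.getD (i % pvLinestyles.length) "" := by
      rw [← List.getD_eq_getElem _ "" gl, cycled_getD pvLinestyles _ _ hl hik]
    simp only [pc, pm, pl, zero_add, PySem.Int.mod_natCast, PySem.List.pyGetD_natCast]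

-- B's zip fold over a group = A's enumerate fold over the same group
lemma inner_zip (b : PySem.Dict String (List (String × String))) (platform : String)
    (ks : List String) (styles : PySem.Dict String (List (String × String)))
    (hc : pvPlatformColors.getD platform (pvPlatformColors.getD "unknown" []) ≠ []) :
    (ks.zip ((pvCycled (pvPlatformColors.getD platform (pvPlatformColors.getD "unknown" []))
        ks.length).zip ((pvCycled pvMarkers ks.length).zip
        (pvCycled pvLinestyles ks.length)))).foldl
      (fun styles kcml =>
        let data := b.getD kcml.1 []
        let framework := (PySem.Dict.mk data).getD "_framework" "unknown"
        let model := (PySem.Dict.mk data).getD "_model" "unknown"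
        let fw_display := pvFrameworkDisplay.getD framework (PySem.Str.upper framework)
        styles.insert kcml.1
          [("color", kcml.2.1), ("marker", kcml.2.2.1), ("linestyle", kcml.2.2.2),
           ("label", PySem.Str.join " " [PySem.Str.upper platform, fw_display, pyCapitalize model])])
      styles
    = pvInner b platform ks styles := by
  rw [zip_cycled_eq ks _ hc, List.foldl_map]
  simp only [pvInner, pvStyleRow]

-- the colors list A and B pick for a platform is never empty
lemma colors_ne_nil (p : String) :
    pvPlatformColors.getD p (pvPlatformColors.getD "unknown" []) ≠ [] := by
  have hit : pvPlatformColors.items =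
      [("nvidia", ["#27AE60", "#229954", "#1E8449", "#52BE80", "#7DCEA0"]),
       ("amd", ["#E74C3C", "#C0392B", "#922B21", "#EC7063", "#F1948A"]),
       ("unknown", ["#9B59B6", "#8E44AD", "#7D3C98", "#AF7AC5", "#D2B4DE"])] := rfl
  simp only [PySem.Dict.getD, PySem.Dict.get?, hit]
  cases h1 : ("nvidia" == p) <;> cases h2 : ("amd" == p) <;> cases h3 : ("unknown" == p) <;>
    simp [List.find?, h1, h2, h3]

-- B is the same fold over the distinct platforms with the filtered groups
lemma B_shape (l : List (String × List (String × String))) :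
    generate_styles_alt l =
      ((PySem.Set.ofList (l.map (fun kd => pvPlat kd.2))).foldl (fun st p =>
        pvInner (PySem.Dict.mk l) p (pvGrpB l p) st) PySem.Dict.empty).items := by
  simp only [generate_styles_alt, PySem.List.dedup_eq_ofList]
  congr 1
  congr 1
  funext st p
  rw [← inner_zip (PySem.Dict.mk l) p (pvGrpB l p) st (colors_ne_nil p)]
  simp only [pvGrpB]

-- key lemma: sorting A's bucket = filtering the globally sorted keys (needs unique keys)
lemma grp_eq (l : List (String × List (String × String))) (hpre : Pre_generate_styles l)
    (p : String) :
    PySem.List.sorted (pvGrpA l p) (fun k => k) false = pvGrpB l p := by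
  obtain ⟨hnd, -⟩ := hpre
  apply PySem.List.sorted_eq_of_perm_of_pairwise_lt
  · -- pvGrpB l p is a permutation of pvGrpA l p
    unfold pvGrpB
    have h1 : (PySem.List.sorted (l.map (fun kd => kd.1)) (fun k => k) false).Perm
        (l.map (fun kd => kd.1)) := PySem.List.sorted_perm _ _ _
    refine ((h1.filter _).trans ?_)
    have h2 : (l.map (fun kd => kd.1)).filter (fun k =>
          (PySem.Dict.mk ((PySem.Dict.mk l).getD k [])).getD "_platform" "unknown" == p)
        = pvGrpA l p := by
      rw [List.filter_map]
      unfold pvGrpA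
      congr 1
      apply List.filter_congr
      intro kd hkd
      have hget : (PySem.Dict.mk l).get? kd.1 = some kd.2 :=
        PySem.Dict.get?_of_mem_items _ hkd hnd
      simp [Function.comp, PySem.Dict.getD_eq_get?_getD, hget, pvPlat]
    rw [h2]
  · -- the filtered sorted key list is strictly increasing
    unfold pvGrpB
    apply List.Pairwise.filter
    have hle : (PySem.List.sorted (l.map (fun kd => kd.1)) (fun k => k) false).Pairwise
        (fun a b => a ≤ b) := PySem.List.sorted_pairwise _ _
    have hne : (PySem.List.sorted (l.map (fun kd => kd.1)) (fun k => k) false).Pairwise (· ≠ ·) :=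
      ((PySem.List.sorted_perm _ _ _).nodup_iff.mpr hnd)
    exact (hle.and hne).imp (fun h => lt_of_le_of_ne h.1 h.2)

-- ===== VERDICT (by name: the statement is the Claim_ definition above) =====
theorem generate_styles_spec : Claim_equal_generate_styles := by
  intro l _hdom hpre
  unfold Spec_generate_styles
  rw [A_shape, B_shape]
  congr 1
  congr 1
  funext st p
  rw [grp_eq l hpre p]
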